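-- pv_equiv track=rewrite | github.com/LucidaDragon/MyWiki | update-html.py | AddCamelSpaces
-- ===== SOURCE A (Python) =====
-- def AddCamelSpaces(s):
-- 	escape = True
-- 	i = 0
-- 	while i < len(s):
-- 		c = s[i]
-- 		upper = c.upper()
-- 		if (i > 0 and (not escape) and c == upper and c.lower() != upper):
-- 			s = s[0:i] + " " + s[i:]
-- 			i += 1
-- 		elif (s[i] == '$'):
-- 			prefix = s[0:i]
-- 			s = "(" + prefix + ")" + s[i + 1:]
-- 			i += 1
-- 		escape = False
-- 		if c == '-': escape = True
-- 		i += 1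
-- 	return s
-- ===== SOURCE B (Python) =====
-- def AddCamelSpaces(s):
--     out = []
--     escape = True
--     for c in s:
--         if not escape and c.isupper():
--             out.append(' ')
--         out.append(c)
--         escape = (c == '-')
--     opens = '(' * out.count('$')
--     return opens + ''.join(')' if c == '$' else c for c in out)
-- ===== Notes on version B (the rewrite author's own statement) =====
-- stated objective: faster
-- what changed: Replaces A's single quadratic loop that repeatedly re-slices and rebuilds the whole string in place by two independent linear stages: a left-to-right scan appending characters to a list (with a space before each unescaped uppercase), then a closed-form paren stage that prepends one opening paren per dollar sign and turns each dollar sign into a closing paren.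
import Mathlib
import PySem

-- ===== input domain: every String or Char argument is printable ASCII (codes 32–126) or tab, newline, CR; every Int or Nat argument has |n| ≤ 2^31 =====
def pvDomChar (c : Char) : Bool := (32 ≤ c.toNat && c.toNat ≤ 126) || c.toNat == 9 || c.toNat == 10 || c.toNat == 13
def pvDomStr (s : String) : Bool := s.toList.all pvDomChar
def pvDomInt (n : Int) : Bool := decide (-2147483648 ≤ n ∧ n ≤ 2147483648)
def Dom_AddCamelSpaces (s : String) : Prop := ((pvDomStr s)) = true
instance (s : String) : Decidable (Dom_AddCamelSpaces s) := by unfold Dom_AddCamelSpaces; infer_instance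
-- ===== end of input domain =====

-- B replaces A's quadratic in-place re-slicing loop by two linear stages (space insertion, then a closed-form paren stage); equivalence proved on all inputs.

-- ===== PORT A =====
-- A's while loop; fuel is the loop measure len(s) - i, which every iteration decreases by exactly 1
def AddCamelSpacesLoop : Nat → List Char → Nat → Bool → List Char
  | 0, s, _, _ => s
  | fuel + 1, s, i, escape =>
    if i < s.length then
      match PySem.List.pyGet? s (i : Int) with
      | none => s  -- unreachable: i < len(s)
      | some c =>
        let upper := PySem.Chars.upperChar c
        -- escape after the iteration is `False`, then `True` if c == '-', i.e. (c == '-')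
        if 0 < i ∧ escape = false ∧ c = upper ∧ PySem.Chars.lowerChar c ≠ upper then
          AddCamelSpacesLoop fuel
            (PySem.List.slice s (some 0) (some (i : Int)) ++ [' '] ++ PySem.List.slice s (some (i : Int)) none)
            (i + 2) (c == '-')
        else if c = '$' then
          AddCamelSpacesLoop fuel
            (['('] ++ PySem.List.slice s (some 0) (some (i : Int)) ++ [')'] ++ PySem.List.slice s (some ((i : Int) + 1)) none)
            (i + 2) (c == '-')
        else
          AddCamelSpacesLoop fuel s (i + 1) (c == '-')
    else s

def AddCamelSpaces (s : String) : String :=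
  String.ofList (AddCamelSpacesLoop s.toList.length s.toList 0 true)

-- ===== PORT B =====
def AddCamelSpaces_alt (s : String) : String :=
  let st := s.toList.foldl
    (fun (st : List Char × Bool) c =>
      ((if !st.2 && PySem.Chars.isupper c then st.1 ++ [' '] else st.1) ++ [c], c == '-'))
    ([], true)
  let out := st.1
  let opens := PySem.List.pyRepeat ['('] ((PySem.List.count out '$' : Nat) : Int)
  -- ''.join over one-character strings concatenates exactly those characters: map (exact)
  String.ofList (opens ++ out.map (fun c => if c = '$' then ')' else c))

-- ===== PRECONDITION & SPEC =====
def Spec_AddCamelSpaces (s : String) (out : String) : Prop := out = AddCamelSpaces_alt s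
instance (s : String) (out : String) : Decidable (Spec_AddCamelSpaces s out) := by unfold Spec_AddCamelSpaces; infer_instance

-- ===== CLAIM (what is proved, stated in full; the proofs are below) =====
def Claim_equal_AddCamelSpaces : Prop := ∀ (s : String), Dom_AddCamelSpaces s → Spec_AddCamelSpaces s (AddCamelSpaces s)

-- ===== LEMMAS AND PROOFS =====

-- stage-1 result (spaces inserted before unescaped uppercase chars), as a structural recursion
def camelG : List Char → Bool → List Char
  | [], _ => []
  | c :: r, esc =>
    (if esc = false ∧ PySem.Chars.isupper c = true then [' '] else []) ++ c :: camelG r (c == '-')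

-- the '$' → ')' substitution of stage 2
def repl (c : Char) : Char := if c = '$' then ')' else c

-- A's uppercase test (c == c.upper() and c.lower() != c.upper()) is exactly isupper
lemma upperCond_iff (c : Char) :
    (c = PySem.Chars.upperChar c ∧ PySem.Chars.lowerChar c ≠ PySem.Chars.upperChar c)
      ↔ PySem.Chars.isupper c = true := by
  constructor
  · rintro ⟨h1, h2⟩
    by_contra hup
    rw [PySem.Chars.lowerChar, if_neg (by simpa using hup)] at h2
    exact h2 h1
  · intro hup
    have h1 : 'A' ≤ c ∧ c ≤ 'Z' := by simpa [PySem.Chars.isupper] using hup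
    have hA : 65 ≤ c.toNat := UInt32.le_iff_toNat_le.mp (Char.le_def.mp h1.1)
    have hZ : c.toNat ≤ 90 := UInt32.le_iff_toNat_le.mp (Char.le_def.mp h1.2)
    have hlow : PySem.Chars.islower c = false := by
      cases hq : PySem.Chars.islower c with
      | false => rfl
      | true =>
        exfalso
        have h2 : 'a' ≤ c ∧ c ≤ 'z' := by simpa [PySem.Chars.islower] using hq
        have h97 : 97 ≤ c.toNat := UInt32.le_iff_toNat_le.mp (Char.le_def.mp h2.1)
        omega
    refine ⟨by simp [PySem.Chars.upperChar, hlow], ?_⟩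
    simp only [PySem.Chars.upperChar, PySem.Chars.lowerChar, hlow, hup, if_pos,
      Bool.false_eq_true, if_false]
    intro hcon
    have hv : (Char.ofNat (c.toNat + 32)).toNat = c.toNat + 32 := by
      rw [Char.toNat_ofNat, if_pos]
      exact Or.inl (by omega)
    have := congrArg Char.toNat hcon
    omega

lemma isupper_ne_dollar {c : Char} (h : PySem.Chars.isupper c = true) : c ≠ '$' := by
  rintro rfl; simp [PySem.Chars.isupper, Char.le_def] at h

lemma isupper_ne_dash {c : Char} (h : PySem.Chars.isupper c = true) : (c == '-') = false := by
  have : c ≠ '-' := by rintro rfl; simp [PySem.Chars.isupper, Char.le_def] at h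
  simpa using this

-- stage 1 does not create or destroy '$'
lemma count_camelG (rest : List Char) (esc : Bool) :
    List.count '$' (camelG rest esc) = List.count '$' rest := by
  induction rest generalizing esc with
  | nil => rfl
  | cons c r ih =>
    simp only [camelG]
    split
    · simp [List.count_cons, ih]
    · simp [List.count_cons, ih]

-- shifting one '(' over a block of '('
lemma replicate_paren_shift (n : Nat) (l : List Char) :
    List.replicate n '(' ++ '(' :: l = '(' :: (List.replicate n '(' ++ l) := by
  have h : List.replicate n '(' ++ ['('] = '(' :: List.replicate n '(' := by
    rw [← List.replicate_succ', List.replicate_succ]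
  calc List.replicate n '(' ++ '(' :: l = (List.replicate n '(' ++ ['(']) ++ l := by simp
    _ = '(' :: (List.replicate n '(' ++ l) := by rw [h]; simp

-- the invariant of A's loop: the processed prefix `done` is final (up to the '(' block
-- still to be collected from the remaining '$'s), the rest is processed as stage 1 + stage 2
lemma loopA_eq (fuel : Nat) (rest done : List Char) (esc : Bool)
    (hfuel : rest.length ≤ fuel) (hesc : done = [] → esc = true) :
    AddCamelSpacesLoop fuel (done ++ rest) done.length esc
      = List.replicate (List.count '$' rest) '(' ++ done ++ (camelG rest esc).map repl := by
  induction fuel generalizing rest done esc with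
  | zero =>
    have : rest = [] := List.eq_nil_of_length_eq_zero (by omega)
    subst this
    simp [AddCamelSpacesLoop, camelG]
  | succ fuel ih =>
    cases rest with
    | nil => simp [AddCamelSpacesLoop, camelG]
    | cons c r =>
      have hlt : done.length < (done ++ c :: r).length := by simp
      have hget : PySem.List.pyGet? (done ++ c :: r) ((done.length : Nat) : Int) = some c := by
        rw [PySem.List.pyGet?_natCast]
        simp
      have hsl0 : PySem.List.slice (done ++ c :: r) (some 0) (some ((done.length : Nat) : Int)) = done := by
        rw [PySem.List.slice_zero_start, PySem.List.slice_to_natCast]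
        exact List.take_left
      simp only [AddCamelSpacesLoop, hlt, if_pos, hget]
      by_cases hcond : 0 < done.length ∧ esc = false ∧ c = PySem.Chars.upperChar c ∧
          PySem.Chars.lowerChar c ≠ PySem.Chars.upperChar c
      · rw [if_pos hcond]
        obtain ⟨hpos, hef, hcu⟩ := hcond
        have hup : PySem.Chars.isupper c = true := (upperCond_iff c).mp hcu
        have hne : c ≠ '$' := isupper_ne_dollar hup
        have hdash : (c == '-') = false := isupper_ne_dash hup
        have hslf : PySem.List.slice (done ++ c :: r) (some ((done.length : Nat) : Int)) none = c :: r := by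
          rw [PySem.List.slice_from_natCast]
          exact List.drop_left
        rw [hsl0, hslf]
        have hre : done ++ [' '] ++ c :: r = (done ++ [' ', c]) ++ r := by simp
        have hi : done.length + 2 = (done ++ [' ', c]).length := by simp
        rw [hre, hi, ih r (done ++ [' ', c]) (c == '-') (by simpa using Nat.le_of_succ_le_succ hfuel)
          (by simp)]
        simp only [camelG, hef, hup, and_self, if_pos, hdash, List.map_append, List.map_cons]
        rw [List.count_cons_of_ne hne]
        simp [repl, hne]
      · rw [if_neg hcond]
        by_cases hdol : c = '$'
        · rw [if_pos hdol]
          subst hdol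
          have hslf : PySem.List.slice (done ++ '$' :: r) (some (((done.length : Nat) : Int) + 1)) none = r := by
            have : ((done.length : Nat) : Int) + 1 = ((done.length + 1 : Nat) : Int) := by push_cast; ring
            rw [this, PySem.List.slice_from_natCast]
            have : done ++ '$' :: r = (done ++ ['$']) ++ r := by simp
            rw [this]
            simp
          rw [hsl0, hslf]
          have hre : ['('] ++ done ++ [')'] ++ r = ('(' :: done ++ [')']) ++ r := by simp
          have hi : done.length + 2 = ('(' :: done ++ [')']).length := by simp
          rw [hre, hi, ih r ('(' :: done ++ [')']) ('$' == '-') (by simpa using Nat.le_of_succ_le_succ hfuel)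
            (by simp)]
          have hnup : PySem.Chars.isupper '$' = false := by decide
          simp only [camelG, hnup, Bool.false_eq_true, and_false, if_false, List.nil_append,
            List.map_cons, List.count_cons_self]
          have hdd : ('$' == '-') = false := by decide
          rw [hdd]
          have hrepl : repl '$' = ')' := by decide
          rw [hrepl, List.replicate_succ]
          rw [show ('(' :: done ++ [')']) = '(' :: (done ++ [')']) by simp]
          rw [replicate_paren_shift]
          simp
        · rw [if_neg hdol]
          have hre : done ++ c :: r = (done ++ [c]) ++ r := by simp
          have hi : done.length + 1 = (done ++ [c]).length := by simp
          rw [hre, hi, ih r (done ++ [c]) (c == '-') (by simpa using Nat.le_of_succ_le_succ hfuel)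
            (by simp)]
          have hnosp : ¬ (esc = false ∧ PySem.Chars.isupper c = true) := by
            rintro ⟨hef, hup⟩
            rcases List.eq_nil_or_concat done with h | h
            · exact absurd (hesc h) (by simp [hef])
            · apply hcond
              refine ⟨?_, hef, (upperCond_iff c).mpr hup⟩
              rcases h with ⟨l, a, rfl⟩; simp
          simp only [camelG, hnosp, if_false, List.nil_append, List.map_cons]
          rw [List.count_cons_of_ne hdol]
          have : repl c = c := by simp [repl, hdol]
          rw [this]
          simp

-- B's fold builds done ++ camelG rest esc
lemma foldB_eq (rest : List Char) (done : List Char) (esc : Bool) :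
    (rest.foldl
      (fun (st : List Char × Bool) c =>
        ((if !st.2 && PySem.Chars.isupper c then st.1 ++ [' '] else st.1) ++ [c], c == '-'))
      (done, esc)).1 = done ++ camelG rest esc := by
  induction rest generalizing done esc with
  | nil => simp [camelG]
  | cons c r ih =>
    simp only [List.foldl_cons, camelG]
    rw [ih]
    by_cases h : esc = false ∧ PySem.Chars.isupper c = true
    · have hb : (!esc && PySem.Chars.isupper c) = true := by simp [h.1, h.2]
      rw [hb, if_pos h]
      simp
    · have hb : (!esc && PySem.Chars.isupper c) = false := by
        rcases Bool.eq_false_or_eq_true esc with he | he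
        · simp [he]
        · cases hq : PySem.Chars.isupper c with
          | false => simp
          | true => exact absurd ⟨he, hq⟩ h
      rw [hb, if_neg h]
      simp

theorem AddCamelSpaces_eq_alt (s : String) : AddCamelSpaces s = AddCamelSpaces_alt s := by
  have hA : AddCamelSpacesLoop s.toList.length s.toList 0 true
      = List.replicate (List.count '$' s.toList) '(' ++ (camelG s.toList true).map repl := by
    simpa using loopA_eq s.toList.length s.toList [] true (le_refl _) (fun _ => rfl)
  simp only [AddCamelSpaces, AddCamelSpaces_alt, hA, foldB_eq, List.nil_append,
    PySem.List.pyRepeat_singleton, PySem.List.count_eq, Int.toNat_natCast, count_camelG]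
  rfl

-- ===== VERDICT (by name: the statement is the Claim_ definition above) =====
theorem AddCamelSpaces_spec : Claim_equal_AddCamelSpaces := by
  intro s _
  unfold Spec_AddCamelSpaces
  exact AddCamelSpaces_eq_alt s
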